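-- pv_equiv track=rewrite | github.com/Maharava/Jupiter | jupiter_tests/test_utils/test_helpers.py | compare_user_data
-- ===== SOURCE A (Python) =====
-- def compare_user_data(user_data1, user_data2, only_check_fields=None):
--     """
--     Compare two user data dictionaries, optionally only checking specific fields
--     """
--     if only_check_fields:
--         for field in only_check_fields:
--             if field not in user_data1 or field not in user_data2:
--                 if field not in user_data1 and field not in user_data2:
--                     continue  # Both don't have this field, so it's equal
--                 return False
--             if user_data1[field] != user_data2[field]:
--                 return False
--         return True
--     else:
--         return user_data1 == user_data2
-- ===== SOURCE B (Python) =====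
-- def compare_user_data(user_data1, user_data2, only_check_fields=None):
--     if only_check_fields:
--         sub1 = {f: user_data1[f] for f in only_check_fields if f in user_data1}
--         sub2 = {f: user_data2[f] for f in only_check_fields if f in user_data2}
--         return sub1 == sub2
--     return user_data1 == user_data2
-- ===== Notes on version B (the rewrite author's own statement) =====
-- stated objective: simpler
-- what changed: Replaces the per-field loop with its membership branches and early returns by building two dicts restricted to the requested fields (keeping only present keys) and comparing them with one ==.
import Mathlib
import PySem

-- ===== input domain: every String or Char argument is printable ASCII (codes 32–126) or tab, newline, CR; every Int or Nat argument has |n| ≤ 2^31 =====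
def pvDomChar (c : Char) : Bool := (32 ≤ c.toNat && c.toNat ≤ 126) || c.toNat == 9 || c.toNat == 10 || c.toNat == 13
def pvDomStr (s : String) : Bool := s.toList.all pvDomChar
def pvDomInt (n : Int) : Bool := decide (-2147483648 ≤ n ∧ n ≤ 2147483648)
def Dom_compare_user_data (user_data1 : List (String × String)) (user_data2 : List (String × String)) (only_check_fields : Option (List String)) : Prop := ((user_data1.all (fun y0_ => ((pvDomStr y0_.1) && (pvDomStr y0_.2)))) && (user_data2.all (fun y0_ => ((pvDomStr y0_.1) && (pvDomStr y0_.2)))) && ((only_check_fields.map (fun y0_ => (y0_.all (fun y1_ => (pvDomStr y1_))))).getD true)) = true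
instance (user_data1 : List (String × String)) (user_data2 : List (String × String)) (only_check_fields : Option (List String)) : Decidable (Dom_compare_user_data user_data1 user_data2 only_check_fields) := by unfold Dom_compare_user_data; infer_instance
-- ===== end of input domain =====

-- B replaces A's per-field loop with early returns by building two field-restricted dicts and
-- comparing them with one dict equality (objective: simpler decomposition, same cost).

-- ===== PORT A =====
-- Python dict '==' (order-insensitive): same key set and same value at every key.
def pyDictEq (d1 d2 : PySem.Dict String String) : Bool :=
  PySem.Set.equal (PySem.Set.ofList d1.keys) (PySem.Set.ofList d2.keys) &&
    d1.keys.all (fun k => d1.get? k == d2.get? k)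

-- the 'for field in only_check_fields' loop of A, with its branch order and early returns
def compareLoopA (d1 d2 : PySem.Dict String String) : List String → Bool
  | [] => true
  | f :: rest =>
    if !(d1.contains f) || !(d2.contains f) then
      if !(d1.contains f) && !(d2.contains f) then compareLoopA d1 d2 rest
      else false
    else if d1.get? f != d2.get? f then false
    else compareLoopA d1 d2 rest

def compare_user_data (user_data1 : List (String × String)) (user_data2 : List (String × String)) (only_check_fields : Option (List String)) : Bool :=
  match only_check_fields with
  | some (f :: fs) => compareLoopA (PySem.Dict.mk user_data1) (PySem.Dict.mk user_data2) (f :: fs)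
  | _ => pyDictEq (PySem.Dict.mk user_data1) (PySem.Dict.mk user_data2)

-- ===== PORT B =====
-- Python dict '==' (order-insensitive), B-side copy: same key set and same value at every key.
def pyDictEqB (d1 d2 : PySem.Dict String String) : Bool :=
  PySem.Set.equal (PySem.Set.ofList d1.keys) (PySem.Set.ofList d2.keys) &&
    d1.keys.all (fun k => d1.get? k == d2.get? k)

-- {f: d[f] for f in fields if f in d}
def restrictDict (d : PySem.Dict String String) (fields : List String) : PySem.Dict String String :=
  fields.foldl (fun acc f => match d.get? f with | some v => acc.insert f v | none => acc) PySem.Dict.empty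

def compare_user_data_alt (user_data1 : List (String × String)) (user_data2 : List (String × String)) (only_check_fields : Option (List String)) : Bool :=
  match only_check_fields with
  | none => pyDictEqB (PySem.Dict.mk user_data1) (PySem.Dict.mk user_data2)
  | some [] => pyDictEqB (PySem.Dict.mk user_data1) (PySem.Dict.mk user_data2)
  | some (f :: fs) =>
    pyDictEqB (restrictDict (PySem.Dict.mk user_data1) (f :: fs))
              (restrictDict (PySem.Dict.mk user_data2) (f :: fs))

-- ===== PRECONDITION & SPEC =====
def Spec_compare_user_data (user_data1 : List (String × String)) (user_data2 : List (String × String)) (only_check_fields : Option (List String)) (out : Bool) : Prop := out = compare_user_data_alt user_data1 user_data2 only_check_fields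
instance (user_data1 : List (String × String)) (user_data2 : List (String × String)) (only_check_fields : Option (List String)) (out : Bool) : Decidable (Spec_compare_user_data user_data1 user_data2 only_check_fields out) := by unfold Spec_compare_user_data; infer_instance

-- ===== CLAIM (what is proved, stated in full; the proofs are below) =====
def Claim_equal_compare_user_data : Prop := ∀ (user_data1 : List (String × String)) (user_data2 : List (String × String)) (only_check_fields : Option (List String)), Dom_compare_user_data user_data1 user_data2 only_check_fields → Spec_compare_user_data user_data1 user_data2 only_check_fields (compare_user_data user_data1 user_data2 only_check_fields)

-- ===== LEMMAS AND PROOFS =====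

-- A's loop is the conjunction of per-field lookup agreement
theorem compareLoopA_eq (d1 d2 : PySem.Dict String String) (fs : List String) :
    compareLoopA d1 d2 fs = fs.all (fun f => d1.get? f == d2.get? f) := by
  induction fs with
  | nil => rfl
  | cons f rest ih =>
    simp only [compareLoopA, List.all_cons, PySem.Dict.contains_eq_isSome_get?]
    cases h1 : d1.get? f <;> cases h2 : d2.get? f <;> simp [ih] <;>
      rw [Bool.eq_iff_iff] <;> simp

-- lookup in the restricted dict
theorem restrictDict_get?_aux (d : PySem.Dict String String) (fs : List String)
    (acc : PySem.Dict String String) (k : String) :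
    (fs.foldl (fun acc f => match d.get? f with | some v => acc.insert f v | none => acc) acc).get? k
      = if k ∈ fs ∧ (d.get? k).isSome then d.get? k else acc.get? k := by
  induction fs generalizing acc with
  | nil => simp
  | cons f rest ih =>
    simp only [List.foldl_cons, ih, List.mem_cons]
    by_cases hk : k ∈ rest ∧ (d.get? k).isSome
    · simp [hk]
    · simp only [hk, if_false]
      cases hf : d.get? f with
      | none =>
        by_cases hkf : k = f
        · subst hkf; simp [hf]
        · simp [hkf, hk]
      | some v =>
        rw [PySem.Dict.get?_insert]
        by_cases hkf : k = f
        · subst hkf; simp [hf]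
        · simp [hkf, hk]

theorem restrictDict_get? (d : PySem.Dict String String) (fs : List String) (k : String) :
    (restrictDict d fs).get? k = if k ∈ fs then d.get? k else none := by
  unfold restrictDict
  rw [restrictDict_get?_aux]
  by_cases hk : k ∈ fs
  · cases h : d.get? k <;> simp [hk, PySem.Dict.get?_empty]
  · simp [hk, PySem.Dict.get?_empty]

-- dict equality of the two restrictions is the same conjunction
theorem pyDictEqB_restrict (d1 d2 : PySem.Dict String String) (fs : List String) :
    pyDictEqB (restrictDict d1 fs) (restrictDict d2 fs)
      = fs.all (fun f => d1.get? f == d2.get? f) := by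
  have key : ∀ (d : PySem.Dict String String) (r : PySem.Dict String String),
      (∀ k, r.get? k = if k ∈ fs then d.get? k else none) →
      ∀ k, (k ∈ r.keys ↔ k ∈ fs ∧ (d.get? k).isSome) := by
    intro d r hr k
    constructor
    · intro hk
      have := (not_iff_not.mpr (PySem.Dict.get?_eq_none_iff_not_mem_keys r k)).mpr
        (by simpa using hk)
      rw [hr] at this
      by_cases hmem : k ∈ fs
      · refine ⟨hmem, ?_⟩
        simp [hmem] at this
        cases h : d.get? k
        · simp [h] at this
        · simp
      · simp [hmem] at this
    · rintro ⟨hmem, hsome⟩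
      have : r.get? k ≠ none := by rw [hr]; simp [hmem]; cases h : d.get? k <;> simp_all
      by_contra hk
      exact this ((PySem.Dict.get?_eq_none_iff_not_mem_keys _ _).mpr hk)
  have h1 := restrictDict_get? d1 fs
  have h2 := restrictDict_get? d2 fs
  rw [Bool.eq_iff_iff]
  unfold pyDictEqB
  rw [Bool.and_eq_true]
  constructor
  · rintro ⟨hkeys, hvals⟩
    rw [List.all_eq_true]
    intro f hf
    rw [beq_iff_eq]
    rw [PySem.Set.equal_iff] at hkeys
    cases hd1 : d1.get? f with
    | some v =>
      have hmem : f ∈ (restrictDict d1 fs).keys :=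
        (key d1 _ h1 f).mpr ⟨hf, by simp [hd1]⟩
      have := (List.all_eq_true.mp hvals) f hmem
      rw [beq_iff_eq, h1, h2, if_pos hf, if_pos hf] at this
      rw [← this, hd1]
    | none =>
      cases hd2 : d2.get? f with
      | none => rfl
      | some w =>
        have hmem2 : f ∈ (restrictDict d2 fs).keys :=
          (key d2 _ h2 f).mpr ⟨hf, by simp [hd2]⟩
        have hmem1 : f ∈ (restrictDict d1 fs).keys := by
          have := hkeys f
          simp only [PySem.Set.mem_ofList] at this
          exact this.mpr hmem2
        have := (key d1 _ h1 f).mp hmem1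
        rw [hd1] at this
        simp at this
  · intro hall
    have hpt : ∀ k, (restrictDict d1 fs).get? k = (restrictDict d2 fs).get? k := by
      intro k
      rw [h1, h2]
      by_cases hk : k ∈ fs
      · have := (List.all_eq_true.mp hall) k hk
        rw [beq_iff_eq] at this
        simp [hk, this]
      · simp [hk]
    constructor
    · rw [PySem.Set.equal_iff]
      intro x
      simp only [PySem.Set.mem_ofList]
      rw [key d1 _ h1 x, key d2 _ h2 x]
      constructor
      · rintro ⟨hm, hs⟩
        refine ⟨hm, ?_⟩
        have := hpt x; rw [h1, h2, if_pos hm, if_pos hm] at this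
        rwa [← this]
      · rintro ⟨hm, hs⟩
        refine ⟨hm, ?_⟩
        have := hpt x; rw [h1, h2, if_pos hm, if_pos hm] at this
        rwa [this]
    · rw [List.all_eq_true]
      intro k _
      rw [beq_iff_eq]
      exact hpt k

-- ===== VERDICT (by name: the statement is the Claim_ definition above) =====
theorem compare_user_data_spec : Claim_equal_compare_user_data := by
  intro u1 u2 ocf _
  unfold Spec_compare_user_data
  match ocf with
  | none => show pyDictEq _ _ = pyDictEqB _ _; rfl
  | some [] => show pyDictEq _ _ = pyDictEqB _ _; rfl
  | some (f :: fs) =>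
    simp only [compare_user_data, compare_user_data_alt]
    rw [compareLoopA_eq, pyDictEqB_restrict]
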